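-- pv_equiv track=rewrite | github.com/Markkreel/BINARY-STATIC-ANALYSIS-THROUGH-INSTRUCTION-AND-OPERAND-EXTRACTION-AND-AHC-ALGORITHM | feature_extraction/feature_extraction_rows.py | parse_disassembly
-- ===== SOURCE A (Python) =====
-- def parse_disassembly(disassembly_text):
--     """Parses the disassembly text and extracts addresses, instructions, operands.
--
--     Args:
--         disassembly_text: The raw text of the disassembled file.
--
--     Returns:
--         A list of lists, where each inner list represents one row in the CSV:
--            - [address, instruction, left_operand, right_operand]
--     """
--
--     results = []
--     current_block = []
--
--     for line in disassembly_text.splitlines():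
--         if line.endswith(':'):  # Address line
--             if current_block:  # Store any previous block
--                 results.append(current_block)
--             current_block = [line.split()[0]]  # Start new block with address
--         elif line.strip():  # Instruction lines
--             parts = line.strip().split('\t')[-1].split()  # Isolate instruction & operands
--             current_block.extend(parts)  # Add instruction, operand(s)
--
--     if current_block:  # Store the last block
--         results.append(current_block)
--
--     return results
-- ===== SOURCE B (Python) =====
-- def _build_row(group):
--     """Turn one group of raw lines into a CSV row."""
--     if group and group[0].endswith(':'):
--         row = [group[0].split()[0]]
--         body = group[1:]
--     else:
--         row = []
--         body = group
--     for line in body: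
--         row += line.strip().split('\t')[-1].split()
--     return row
--
--
-- def parse_disassembly(disassembly_text):
--     """Parses the disassembly text and extracts addresses, instructions, operands.
--
--     Two passes: first segment the lines into groups (one group per block,
--     a new group starting at each line that ends with ':'), then map each
--     group to its row, keeping the non-empty rows.
--     """
--     groups = []
--     for line in disassembly_text.splitlines():
--         if line.endswith(':'):
--             groups.append([line])
--         elif line.strip():
--             if not groups:
--                 groups.append([])
--             groups[-1].append(line)
--     return [row for row in (_build_row(g) for g in groups) if row]
-- ===== Notes on version B (the rewrite author's own statement) =====
-- stated objective: alternative
-- what changed: Replaces A's single flush-on-boundary loop carrying (results, current_block) by two passes: a segmentation pass that groups the raw lines into blocks, then a mapping pass that builds one row per group and keeps the non-empty rows.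
import Mathlib
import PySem

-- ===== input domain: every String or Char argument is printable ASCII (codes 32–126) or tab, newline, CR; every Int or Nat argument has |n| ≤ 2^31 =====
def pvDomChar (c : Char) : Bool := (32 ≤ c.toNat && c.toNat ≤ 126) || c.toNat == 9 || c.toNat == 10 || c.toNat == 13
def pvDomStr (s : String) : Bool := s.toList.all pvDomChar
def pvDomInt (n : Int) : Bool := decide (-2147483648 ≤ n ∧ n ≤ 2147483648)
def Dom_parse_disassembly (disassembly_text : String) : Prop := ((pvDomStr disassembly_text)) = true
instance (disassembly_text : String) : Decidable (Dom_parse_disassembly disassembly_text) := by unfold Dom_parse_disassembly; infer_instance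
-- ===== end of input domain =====

-- B re-implements A's single flush-on-boundary loop as two passes (segment the lines
-- into block groups, then map each group to its row); same cost, different decomposition.

-- ===== PORT A =====
-- line.strip().split('\t')[-1].split() — split? is some (sep "\t" ≠ ""), and the split
-- list is always non-empty so Python's [-1] never raises; getD defaults are unreachable.
def pvAParts (line : String) : List String :=
  PySem.Str.split₀
    ((PySem.List.pyGet? ((PySem.Str.split? (PySem.Str.strip line) "\t").getD []) (-1)).getD "")

-- one iteration of A's loop over the lines; state = (results, current_block)
def pvAStep (st : List (List String) × List String) (line : String) :
    List (List String) × List String :=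
  if PySem.Str.endswith line ":" then
    -- line.split()[0]: split() is non-empty (line ends with ':'), so [0] never raises
    ((if st.2.isEmpty then st.1 else st.1 ++ [st.2]),
     [(PySem.List.pyGet? (PySem.Str.split₀ line) 0).getD ""])
  else if (PySem.Str.strip line).isEmpty then st
  else (st.1, st.2 ++ pvAParts line)

def parse_disassembly (disassembly_text : String) : List (List String) :=
  let r := (PySem.Str.splitlines disassembly_text).foldl pvAStep ([], [])
  if r.2.isEmpty then r.1 else r.1 ++ [r.2]

-- ===== PORT B =====
-- line.strip().split('\t')[-1].split()  (same expression as in Source A / Source B)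
def pvBParts (line : String) : List String :=
  PySem.Str.split₀
    ((PySem.List.pyGet? ((PySem.Str.split? (PySem.Str.strip line) "\t").getD []) (-1)).getD "")

-- _build_row from Source B
def pvBuildRow (group : List String) : List String :=
  let p : List String × List String :=
    match group with
    | g0 :: rest =>
      if PySem.Str.endswith g0 ":" then
        -- group[0].split()[0]: split() is non-empty (g0 ends with ':'), [0] never raises
        ([(PySem.List.pyGet? (PySem.Str.split₀ g0) 0).getD ""], rest)
      else ([], group)
    | [] => ([], group)
  p.2.foldl (fun row line => row ++ pvBParts line) p.1

-- 'if not groups: groups.append([]); groups[-1].append(line)'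
def pvAddLast (groups : List (List String)) (line : String) : List (List String) :=
  let gs := if groups.isEmpty then [([] : List String)] else groups
  gs.dropLast ++ [gs.getLastD [] ++ [line]]

-- one iteration of Source B's first pass
def pvBStep (groups : List (List String)) (line : String) : List (List String) :=
  if PySem.Str.endswith line ":" then groups ++ [[line]]
  else if (PySem.Str.strip line).isEmpty then groups
  else pvAddLast groups line

def parse_disassembly_alt (disassembly_text : String) : List (List String) :=
  let groups := (PySem.Str.splitlines disassembly_text).foldl pvBStep []
  (groups.map pvBuildRow).filter (fun row => !row.isEmpty)

-- ===== PRECONDITION & SPEC =====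
def Spec_parse_disassembly (disassembly_text : String) (out : List (List String)) : Prop := out = parse_disassembly_alt disassembly_text
instance (disassembly_text : String) (out : List (List String)) : Decidable (Spec_parse_disassembly disassembly_text out) := by unfold Spec_parse_disassembly; infer_instance

-- ===== CLAIM (what is proved, stated in full; the proofs are below) =====
def Claim_equal_parse_disassembly : Prop := ∀ (disassembly_text : String), Dom_parse_disassembly disassembly_text → Spec_parse_disassembly disassembly_text (parse_disassembly disassembly_text)

-- ===== LEMMAS AND PROOFS =====

-- A's final flush, as a function (also = filtering the singleton row)
def pvFlush (res : List (List String)) (cb : List String) : List (List String) :=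
  if cb.isEmpty then res else res ++ [cb]

lemma pvFlush_eq (res : List (List String)) (cb : List String) :
    pvFlush res cb = res ++ [cb].filter (fun row => !row.isEmpty) := by
  by_cases h : cb.isEmpty <;> simp [pvFlush, h]

lemma pvBuildRow_single_addr (line : String)
    (h : PySem.Chars.endswith line.toList [':'] = true) :
    pvBuildRow [line] = [(PySem.List.pyGet? (PySem.Str.split₀ line) 0).getD ""] := by
  simp [pvBuildRow, h]

lemma pvBuildRow_append (g : List String) (line : String)
    (h : PySem.Chars.endswith line.toList [':'] = false) :
    pvBuildRow (g ++ [line]) = pvBuildRow g ++ pvBParts line := by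
  cases g with
  | nil => simp [pvBuildRow, h]
  | cons g0 rest =>
    by_cases h0 : PySem.Chars.endswith g0.toList [':'] = true
    · simp [pvBuildRow, h0]
    · simp [pvBuildRow, eq_false_of_ne_true h0]

lemma pv_decomp (g0 : List String) (gs : List (List String)) :
    (g0 :: gs).dropLast ++ [(g0 :: gs).getLastD []] = g0 :: gs := by
  have hne : (g0 :: gs : List (List String)) ≠ [] := by simp
  rw [List.getLastD_eq_getLast?, List.getLast?_eq_some_getLast hne, Option.getD_some]
  exact List.dropLast_append_getLast hne

-- the invariant: A's flushed state equals B's filtered rows, and current_block is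
-- the row of B's last group
lemma pv_inv (lines : List String) :
    ∀ (res : List (List String)) (cb : List String) (groups : List (List String)),
      pvFlush res cb = (groups.map pvBuildRow).filter (fun row => !row.isEmpty) →
      cb = (groups.map pvBuildRow).getLastD [] →
      pvFlush (lines.foldl pvAStep (res, cb)).1 (lines.foldl pvAStep (res, cb)).2
        = (((lines.foldl pvBStep groups).map pvBuildRow).filter (fun row => !row.isEmpty)) := by
  induction lines with
  | nil => intro res cb groups h1 h2; simpa using h1
  | cons line rest ih =>
    intro res cb groups h1 h2
    by_cases he : PySem.Chars.endswith line.toList [':'] = true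
    · -- address line: A flushes and starts [tok]; B appends the group [[line]]
      have hstepA : pvAStep (res, cb) line
          = (pvFlush res cb, [(PySem.List.pyGet? (PySem.Str.split₀ line) 0).getD ""]) := by
        simp [pvAStep, pvFlush, he]
      have hstepB : pvBStep groups line = groups ++ [[line]] := by
        simp [pvBStep, he]
      simp only [List.foldl_cons, hstepA, hstepB]
      apply ih
      · rw [pvFlush_eq]
        simp [List.map_append, List.filter_append, pvBuildRow_single_addr line he, h1]
      · simp [List.map_append, pvBuildRow_single_addr line he]
    · have he' : PySem.Chars.endswith line.toList [':'] = false := eq_false_of_ne_true he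
      by_cases hs : PySem.Str.strip line = ""
      · -- blank line: both skip
        have hstepA : pvAStep (res, cb) line = (res, cb) := by simp [pvAStep, he', hs]
        have hstepB : pvBStep groups line = groups := by simp [pvBStep, he', hs]
        simp only [List.foldl_cons, hstepA, hstepB]
        exact ih res cb groups h1 h2
      · -- instruction line
        have hstepA : pvAStep (res, cb) line = (res, cb ++ pvAParts line) := by
          simp [pvAStep, he', hs]
        have hpp : pvAParts line = pvBParts line := rfl
        have hstepB : pvBStep groups line = pvAddLast groups line := by
          simp [pvBStep, he', hs]
        simp only [List.foldl_cons, hstepA, hstepB]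
        cases groups with
        | nil =>
          have hcb : cb = [] := by simpa using h2
          have hres : res = [] := by
            rw [pvFlush_eq] at h1; simpa [hcb] using h1
          have hadd : pvAddLast [] line = [[line]] := by simp [pvAddLast]
          have hrow : pvBuildRow [line] = pvBParts line := by
            simp [pvBuildRow, he']
          rw [hadd]
          apply ih
          · rw [pvFlush_eq]; simp [hres, hcb, hrow, hpp]
          · simp [hrow, hcb, hpp]
        | cons g0 gs =>
          have hdec := pv_decomp g0 gs
          have hadd : pvAddLast (g0 :: gs) line
              = (g0 :: gs).dropLast ++ [(g0 :: gs).getLastD [] ++ [line]] := by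
            simp [pvAddLast]
          have hcb : cb = pvBuildRow ((g0 :: gs).getLastD []) := by
            rw [h2]; conv_lhs => rw [← hdec]
            simp [List.map_append]
          have hres : res
              = ((g0 :: gs).dropLast.map pvBuildRow).filter (fun row => !row.isEmpty) := by
            have h1' := h1
            conv_rhs at h1' => rw [← hdec]
            rw [pvFlush_eq, List.map_append, List.filter_append] at h1'
            simp only [List.map_cons, List.map_nil, ← hcb] at h1'
            exact List.append_cancel_right h1'
          rw [hadd]
          apply ih
          · rw [pvFlush_eq, List.map_append, List.filter_append]
            simp only [List.map_cons, List.map_nil]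
            rw [pvBuildRow_append _ _ he', ← hcb, hres, hpp]
          · rw [List.map_append]
            simp only [List.map_cons, List.map_nil]
            rw [pvBuildRow_append _ _ he', ← hcb, hpp]
            simp

-- ===== VERDICT (by name: the statement is the Claim_ definition above) =====
theorem parse_disassembly_spec : Claim_equal_parse_disassembly := by
  intro t _
  unfold Spec_parse_disassembly parse_disassembly parse_disassembly_alt
  have h := pv_inv (PySem.Str.splitlines t) [] [] [] (by simp [pvFlush]) (by simp)
  simpa [pvFlush] using h
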